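-- pv_equiv track=rewrite | github.com/YupengHan/matmul_optimizer | scripts/graph.py | parse_numstat_output
-- ===== SOURCE A (Python) =====
-- from typing import Any, Dict, Iterable, List, Optional, Sequence
--
-- def parse_numstat_output(text: str) -> Dict[str, int]:
--     summary = {
--         'files_changed': 0,
--         'insertions': 0,
--         'deletions': 0,
--     }
--     for line in text.splitlines():
--         parts = line.split('\t', 2)
--         if len(parts) != 3:
--             continue
--         added, deleted, _path = parts
--         summary['files_changed'] += 1
--         summary['insertions'] += int(added) if added.isdigit() else 0
--         summary['deletions'] += int(deleted) if deleted.isdigit() else 0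
--     return summary
-- ===== SOURCE B (Python) =====
-- def parse_numstat_output(text):
--     files = insertions = deletions = 0
--     field = 0   # 0: reading added, 1: reading deleted, 2: inside the path
--     start = 0   # index where the current field begins
--     add = dele = 0
--     n = len(text)
--     for i in range(n + 1):
--         c = text[i] if i < n else '\n'   # virtual trailing newline ends the last line
--         if c == '\n' or c == '\r':
--             if field >= 2:
--                 files += 1
--                 insertions += add
--                 deletions += dele
--             field = 0
--             start = i + 1
--         elif field >= 2:
--             pass
--         elif c == '\t':
--             part = text[start:i]
--             v = int(part) if part.isdigit() else 0
--             if field == 0: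
--                 add = v
--             else:
--                 dele = v
--             field += 1
--             start = i + 1
--     return {'files_changed': files, 'insertions': insertions, 'deletions': deletions}
-- ===== Notes on version B (the rewrite author's own statement) =====
-- stated objective: alternative
-- what changed: A splits the text into lines and each line into at most three tab-separated fields with string split calls, mutating a counter dict per line; B makes a single index scan over the characters, tracking the current field's start offset itself, slicing each numeric field out when it meets a tab and flushing the counters at each line break.
import Mathlib
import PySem

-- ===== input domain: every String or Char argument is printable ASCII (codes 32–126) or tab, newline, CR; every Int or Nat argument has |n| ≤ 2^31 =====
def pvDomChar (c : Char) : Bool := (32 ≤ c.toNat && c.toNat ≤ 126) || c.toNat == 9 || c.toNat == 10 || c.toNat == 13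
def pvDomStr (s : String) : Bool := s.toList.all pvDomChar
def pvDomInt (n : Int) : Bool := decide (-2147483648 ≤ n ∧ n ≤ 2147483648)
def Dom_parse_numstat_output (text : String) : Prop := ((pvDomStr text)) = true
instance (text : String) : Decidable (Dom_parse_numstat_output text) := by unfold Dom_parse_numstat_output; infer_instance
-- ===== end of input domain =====

-- B replaces A's line-splitting and per-line field-splitting by a single index scan over
-- the characters that tracks field boundaries itself: an alternative algorithm, same O(n) cost.

-- ===== PORT A =====
-- one loop iteration: split the line (maxsplit 2), skip unless 3 parts, bump the
-- three counters of the summary dict in place ('int(added)' is guarded by isdigit,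
-- so 'ofStr? .getD 0' is exact there)
def pvStepA (d : PySem.Dict String Int) (line : String) : PySem.Dict String Int :=
  match PySem.Str.splitMax? line "\t" 2 with
  | some [added, deleted, _path] =>
      (((d.modify "files_changed" 0 (· + 1)).modify "insertions" 0
          (· + (if PySem.Str.strIsdigit added then (PySem.Int.ofStr? added).getD 0 else 0))).modify
        "deletions" 0
          (· + (if PySem.Str.strIsdigit deleted then (PySem.Int.ofStr? deleted).getD 0 else 0)))
  | _ => d

def parse_numstat_output (text : String) : List (String × Int) :=
  ((PySem.Str.splitlines text).foldl pvStepA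
    (PySem.Dict.mk [("files_changed", 0), ("insertions", 0), ("deletions", 0)])).items

-- ===== PORT B =====
-- scanner state: the three counters, the current field index (0 = added, 1 = deleted,
-- 2 = inside the path), the index where the current field starts, and the two
-- committed field values of the current line
structure PvSt where
  files : Int
  ins : Int
  dels : Int
  field : Int
  start : Int
  add : Int
  dele : Int
deriving Repr, DecidableEq

-- 'int(part) if part.isdigit() else 0' ('ofChars? .getD 0' is exact under the isdigit guard)
def pvVal (part : List Char) : Int :=
  if PySem.Chars.strIsdigit part then (PySem.Int.ofChars? part).getD 0 else 0

-- one iteration of Source B's index loop; 'text[i] if i < n else '\n'' (the pyGet? is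
-- always in range when taken, so the .getD default is never used)
def pvStepB (cs : List Char) (s : PvSt) (i : Int) : PvSt :=
  let c := if i < (cs.length : Int) then (PySem.List.pyGet? cs i).getD '\n' else '\n'
  if c = '\n' ∨ c = '\r' then
    let s := if 2 ≤ s.field then
        { s with files := s.files + 1, ins := s.ins + s.add, dels := s.dels + s.dele }
      else s
    { s with field := 0, start := i + 1 }
  else if 2 ≤ s.field then s
  else if c = '\t' then
    let v := pvVal (PySem.List.slice cs (some s.start) (some i))
    let s := if s.field = 0 then { s with add := v } else { s with dele := v }
    { s with field := s.field + 1, start := i + 1 }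
  else s

def parse_numstat_output_alt (text : String) : List (String × Int) :=
  let cs := text.toList
  let fin := (PySem.List.pyRange 0 ((cs.length : Int) + 1) 1).foldl (pvStepB cs)
    ⟨0, 0, 0, 0, 0, 0, 0⟩
  [("files_changed", fin.files), ("insertions", fin.ins), ("deletions", fin.dels)]

-- ===== PRECONDITION & SPEC =====
def Spec_parse_numstat_output (text : String) (out : List (String × Int)) : Prop := out = parse_numstat_output_alt text
instance (text : String) (out : List (String × Int)) : Decidable (Spec_parse_numstat_output text out) := by unfold Spec_parse_numstat_output; infer_instance

-- ===== CLAIM (what is proved, stated in full; the proofs are below) =====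
def Claim_equal_parse_numstat_output : Prop := ∀ (text : String), Dom_parse_numstat_output text → Spec_parse_numstat_output text (parse_numstat_output text)

-- ===== LEMMAS AND PROOFS =====

-- break characters inside Dom (splitlines' other break characters are outside Dom)
def pvBrk (c : Char) : Bool := c = '\n' || c = '\r'

-- the contribution of one line, computed the way A computes it (at the Chars level)
def pvContrib (l : List Char) : Int × Int × Int :=
  match PySem.Chars.splitMax? l ['\t'] 2 with
  | some [a, d, _] => (1, pvVal a, pvVal d)
  | _ => (0, 0, 0)

def pvCsum (ls : List (List Char)) : Int × Int × Int :=
  ((ls.map (fun l => (pvContrib l).1)).sum,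
   (ls.map (fun l => (pvContrib l).2.1)).sum,
   (ls.map (fun l => (pvContrib l).2.2)).sum)

-- line splitter on Dom: every '\n' / '\r' ends a line ('\r\n' yields an extra empty
-- line and a trailing line is always emitted — harmless for pvCsum, see pvCsum_go)
def pvLines : List Char → List Char → List (List Char)
  | [], p => [p]
  | c :: r, p => if pvBrk c then p :: pvLines r [] else pvLines r (p ++ [c])

-- the in-line action of the scanner on one char (field, acc, add, dele)
def pvLStep : (Int × List Char × Int × Int) → Char → (Int × List Char × Int × Int)
  | (field, acc, add, dele), c =>
    if 2 ≤ field then (field, acc, add, dele)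
    else if c = '\t' then
      (field + 1, [], (if field = 0 then pvVal acc else add),
        (if field = 0 then dele else pvVal acc))
    else (field, acc ++ [c], add, dele)

def pvLineSt (p : List Char) : Int × List Char × Int × Int := p.foldl pvLStep (0, [], 0, 0)

def pvFlush : (Int × List Char × Int × Int) → Int × Int × Int
  | (field, _, add, dele) => if 2 ≤ field then (1, add, dele) else (0, 0, 0)

def pvAdd3 : Int × Int × Int → Int × Int × Int → Int × Int × Int
  | (a, b, c), (x, y, z) => (a + x, b + y, c + z)

-- the abstract character scanner (index-free counterpart of pvStepB's loop)
def pvScan : List Char → Int × Int × Int → (Int × List Char × Int × Int) → Int × Int × Int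
  | [], C, _ => C
  | c :: r, C, st =>
    if pvBrk c then pvScan r (pvAdd3 C (pvFlush st)) (0, [], st.2.2.1, st.2.2.2)
    else pvScan r C (pvLStep st c)

----------------------------------------------------------------
-- splitOnMax.go characterization (sep = ['\t'])
----------------------------------------------------------------

theorem pvGoNil (fuel m : Nat) (cur : List Char) (acc : List (List Char)) :
    PySem.Chars.splitOnMax.go ['\t'] fuel m [] cur acc = (cur.reverse :: acc).reverse := by
  cases fuel <;> simp [PySem.Chars.splitOnMax.go]

theorem pvGoZero (fuel : Nat) (l cur : List Char) (acc : List (List Char)) :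
    PySem.Chars.splitOnMax.go ['\t'] fuel 0 l cur acc = ((cur.reverse ++ l) :: acc).reverse := by
  cases fuel with
  | zero => simp [PySem.Chars.splitOnMax.go]
  | succ f => cases l <;> simp [PySem.Chars.splitOnMax.go]

theorem pvGoTab (fuel m : Nat) (rest cur : List Char) (acc : List (List Char)) (hm : m ≠ 0) :
    PySem.Chars.splitOnMax.go ['\t'] (fuel + 1) m ('\t' :: rest) cur acc
      = PySem.Chars.splitOnMax.go ['\t'] fuel (m - 1) rest [] (cur.reverse :: acc) := by
  simp [PySem.Chars.splitOnMax.go, hm, List.isPrefixOf]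

theorem pvGoSkip (x : List Char) :
    ∀ (hx : '\t' ∉ x) (fuel : Nat) (rest cur : List Char) (acc : List (List Char)) (m : Nat),
      m ≠ 0 → x.length < fuel →
      PySem.Chars.splitOnMax.go ['\t'] fuel m (x ++ rest) cur acc
        = PySem.Chars.splitOnMax.go ['\t'] (fuel - x.length) m rest (x.reverse ++ cur) acc := by
  induction x with
  | nil => intro _ fuel rest cur acc m _ _; simp
  | cons c x ih =>
    intro hx fuel rest cur acc m hm hf
    cases fuel with
    | zero => omega
    | succ f =>
      have hc : c ≠ '\t' := fun h => hx (h ▸ List.mem_cons_self)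
      have hx' : '\t' ∉ x := fun h => hx (List.mem_cons_of_mem _ h)
      have hpre : List.isPrefixOf ['\t'] (c :: (x ++ rest)) = false := by
        simp [List.isPrefixOf]; exact fun h => absurd h.symm hc
      have hstep : PySem.Chars.splitOnMax.go ['\t'] (f + 1) m (c :: (x ++ rest)) cur acc
          = PySem.Chars.splitOnMax.go ['\t'] f m (x ++ rest) (c :: cur) acc := by
        simp [PySem.Chars.splitOnMax.go, hm, hpre]
      rw [List.cons_append, hstep, ih hx' f rest (c :: cur) acc m hm (by simpa using hf)]
      have : f - x.length = f + 1 - (x.length + 1) := by omega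
      rw [this]
      simp

theorem pvSplitMax_eq (p : List Char) :
    PySem.Chars.splitMax? p ['\t'] 2
      = some (PySem.Chars.splitOnMax.go ['\t'] (p.length + 1) 2 p [] []) := rfl

-- split('\t', 2) on the three possible shapes of a line
theorem pvSplit0 (p : List Char) (hp : '\t' ∉ p) :
    PySem.Chars.splitMax? p ['\t'] 2 = some [p] := by
  rw [pvSplitMax_eq]
  have h1 := pvGoSkip p hp (p.length + 1) [] [] [] 2 (by omega) (by omega)
  rw [show p ++ ([] : List Char) = p from by simp] at h1
  rw [h1, pvGoNil]
  simp

theorem pvSplit1 (A q : List Char) (hA : '\t' ∉ A) (hq : '\t' ∉ q) :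
    PySem.Chars.splitMax? (A ++ '\t' :: q) ['\t'] 2 = some [A, q] := by
  rw [pvSplitMax_eq]
  set fuel := (A ++ '\t' :: q).length + 1 with hfuel
  have hlen : (A ++ '\t' :: q).length = A.length + 1 + q.length := by simp; omega
  have h1 := pvGoSkip A hA fuel ('\t' :: q) [] [] 2 (by omega) (by omega)
  rw [h1]
  obtain ⟨f2, hf2⟩ : ∃ f2, fuel - A.length = f2 + 1 ∧ q.length < f2 := ⟨fuel - A.length - 1, by omega⟩
  rw [hf2.1, pvGoTab _ 2 _ _ _ (by omega)]
  have h3 := pvGoSkip q hq f2 [] [] [(A.reverse ++ []).reverse] 1 (by omega) hf2.2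
  rw [show q ++ ([] : List Char) = q from by simp] at h3
  rw [h3, pvGoNil]
  simp

theorem pvSplit2 (A B C : List Char) (hA : '\t' ∉ A) (hB : '\t' ∉ B) :
    PySem.Chars.splitMax? (A ++ '\t' :: (B ++ '\t' :: C)) ['\t'] 2 = some [A, B, C] := by
  rw [pvSplitMax_eq]
  set fuel := (A ++ '\t' :: (B ++ '\t' :: C)).length + 1 with hfuel
  have hlen : (A ++ '\t' :: (B ++ '\t' :: C)).length = A.length + 1 + B.length + 1 + C.length := by
    simp; omega
  have h1 := pvGoSkip A hA fuel ('\t' :: (B ++ '\t' :: C)) [] [] 2 (by omega) (by omega)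
  rw [h1]
  obtain ⟨f2, hf2⟩ : ∃ f2, fuel - A.length = f2 + 1 ∧ B.length < f2 :=
    ⟨fuel - A.length - 1, by omega⟩
  rw [hf2.1, pvGoTab _ 2 _ _ _ (by omega)]
  have h2 := pvGoSkip B hB f2 ('\t' :: C) [] [(A.reverse ++ []).reverse] 1 (by omega) hf2.2
  rw [h2]
  obtain ⟨f3, hf3⟩ : ∃ f3, f2 - B.length = f3 + 1 := ⟨f2 - B.length - 1, by omega⟩
  rw [hf3, pvGoTab _ 1 _ _ _ (by omega), pvGoZero]
  simp

----------------------------------------------------------------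
-- the per-line lemma: flushing the scanned line state = A's contribution
----------------------------------------------------------------

theorem pvLStep_skip (x : List Char) (st : Int × List Char × Int × Int) (h : 2 ≤ st.1) :
    x.foldl pvLStep st = st := by
  induction x with
  | nil => rfl
  | cons c x ih =>
    obtain ⟨f, acc, a, e⟩ := st
    simp only [List.foldl_cons]
    rw [show pvLStep (f, acc, a, e) c = (f, acc, a, e) from by simp [pvLStep, h]]
    exact ih

theorem pvLStep_tabfree (x : List Char) (hx : '\t' ∉ x) :
    ∀ (field : Int) (acc : List Char) (add dele : Int), ¬ 2 ≤ field →
      x.foldl pvLStep (field, acc, add, dele) = (field, acc ++ x, add, dele) := by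
  induction x with
  | nil => intro field acc add dele _; simp
  | cons c x ih =>
    intro field acc add dele hf
    have hc : c ≠ '\t' := fun h => hx (h ▸ List.mem_cons_self)
    simp only [List.foldl_cons]
    rw [show pvLStep (field, acc, add, dele) c = (field, acc ++ [c], add, dele) from by
      simp [pvLStep, hf, hc]]
    rw [ih (fun h => hx (List.mem_cons_of_mem _ h)) field (acc ++ [c]) add dele hf]
    simp

-- decompose a list at its first '\t'
theorem pvTabSplit (p : List Char) (h : '\t' ∈ p) :
    ∃ A q, p = A ++ '\t' :: q ∧ '\t' ∉ A := by
  induction p with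
  | nil => cases h
  | cons c r ih =>
    by_cases hc : c = '\t'
    · exact ⟨[], r, by simp [hc], by simp⟩
    · have hr : '\t' ∈ r := by
        rcases List.mem_cons.1 h with h' | h'
        · exact absurd h'.symm hc
        · exact h'
      obtain ⟨A, q, h1, h2⟩ := ih hr
      refine ⟨c :: A, q, by simp [h1], ?_⟩
      intro hm
      rcases List.mem_cons.1 hm with h' | h'
      · exact hc h'.symm
      · exact h2 h'

theorem pvLine_contrib (p : List Char) : pvFlush (pvLineSt p) = pvContrib p := by
  by_cases hp : '\t' ∈ p
  · obtain ⟨A, q, rfl, hA⟩ := pvTabSplit p hp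
    have hstep : pvLineSt (A ++ '\t' :: q) = q.foldl pvLStep (1, [], pvVal A, 0) := by
      unfold pvLineSt
      rw [List.foldl_append, pvLStep_tabfree A hA 0 [] 0 0 (by omega)]
      simp [pvLStep]
    by_cases hq : '\t' ∈ q
    · obtain ⟨B, C, rfl, hB⟩ := pvTabSplit q hq
      rw [pvContrib, pvSplit2 A B C hA hB]
      rw [hstep, List.foldl_append, pvLStep_tabfree B hB 1 [] (pvVal A) 0 (by omega),
        List.foldl_cons]
      rw [show pvLStep (1, ([] : List Char) ++ B, pvVal A, 0) '\t' = (2, [], pvVal A, pvVal B) from by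
        simp [pvLStep]]
      rw [pvLStep_skip C (2, [], pvVal A, pvVal B) (by simp)]
      simp [pvFlush]
    · rw [pvContrib, pvSplit1 A q hA hq]
      rw [hstep, pvLStep_tabfree q hq 1 [] (pvVal A) 0 (by omega)]
      simp [pvFlush]
  · rw [pvContrib, pvSplit0 p hp]
    rw [pvLineSt, pvLStep_tabfree p hp 0 [] 0 0 (by omega)]
    simp [pvFlush]

----------------------------------------------------------------
-- the abstract scanner computes the line-wise sums
----------------------------------------------------------------

-- after a flush the stale add/dele are never read before being overwritten
theorem pvScan_stale (l : List Char) :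
    (∀ (C : Int × Int × Int) (acc : List Char) (a e a' e' : Int),
        pvScan l C (0, acc, a, e) = pvScan l C (0, acc, a', e')) ∧
    (∀ (C : Int × Int × Int) (acc : List Char) (a e e' : Int),
        pvScan l C (1, acc, a, e) = pvScan l C (1, acc, a, e')) := by
  induction l with
  | nil => exact ⟨fun _ _ _ _ _ _ => rfl, fun _ _ _ _ _ => rfl⟩
  | cons c r ih =>
    constructor
    · intro C acc a e a' e'
      by_cases hb : pvBrk c = true
      · simp only [pvScan, hb, if_true, pvFlush]
        norm_num
        exact ih.1 _ [] a e a' e'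
      · by_cases ht : c = '\t'
        · subst ht
          simp only [pvScan, show pvBrk '\t' = false from by decide, if_false, pvLStep]
          norm_num
          exact ih.2 C [] (pvVal acc) e e'
        · simp only [pvScan, hb, if_false, pvLStep, ht]
          norm_num
          exact ih.1 C (acc ++ [c]) a e a' e'
    · intro C acc a e e'
      by_cases hb : pvBrk c = true
      · simp only [pvScan, hb, if_true, pvFlush]
        norm_num
        exact ih.1 _ [] a e a e'
      · by_cases ht : c = '\t'
        · subst ht
          simp only [pvScan, show pvBrk '\t' = false from by decide, if_false, pvLStep]
          norm_num
        · simp only [pvScan, hb, if_false, pvLStep, ht]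
          norm_num
          exact ih.2 C (acc ++ [c]) a e e'

theorem pvAdd3_zero (C : Int × Int × Int) : pvAdd3 C (0, 0, 0) = C := by
  obtain ⟨a, b, c⟩ := C; simp [pvAdd3]

theorem pvAdd3_def (x y : Int × Int × Int) :
    pvAdd3 x y = (x.1 + y.1, x.2.1 + y.2.1, x.2.2 + y.2.2) := by
  obtain ⟨a, b, c⟩ := x; obtain ⟨u, v, w⟩ := y; rfl

theorem pvAdd3_assoc (A B C : Int × Int × Int) :
    pvAdd3 (pvAdd3 A B) C = pvAdd3 A (pvAdd3 B C) := by
  obtain ⟨a, b, c⟩ := A; obtain ⟨x, y, z⟩ := B; obtain ⟨u, v, w⟩ := C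
  simp [pvAdd3]; omega

theorem pvCsum_cons (l : List Char) (ls : List (List Char)) :
    pvCsum (l :: ls) = pvAdd3 (pvContrib l) (pvCsum ls) := by
  simp [pvCsum, pvAdd3]

theorem pvScan_lines (rest : List Char) :
    ∀ (C : Int × Int × Int) (p : List Char),
      pvScan (rest ++ ['\n']) C (pvLineSt p) = pvAdd3 C (pvCsum (pvLines rest p)) := by
  induction rest with
  | nil =>
    intro C p
    have h1 : pvScan ['\n'] C (pvLineSt p) = pvAdd3 C (pvFlush (pvLineSt p)) := by
      simp [pvScan, pvBrk]
    simp only [List.nil_append, h1, pvLine_contrib, pvLines, pvCsum_cons]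
    rw [show pvCsum [] = (0,0,0) from rfl, pvAdd3_zero]
  | cons c r ih =>
    intro C p
    by_cases hb : pvBrk c
    · have h1 : pvScan ((c :: r) ++ ['\n']) C (pvLineSt p)
          = pvScan (r ++ ['\n']) (pvAdd3 C (pvFlush (pvLineSt p)))
              (0, [], (pvLineSt p).2.2.1, (pvLineSt p).2.2.2) := by
        simp [pvScan, hb]
      rw [h1, (pvScan_stale (r ++ ['\n'])).1 _ [] (pvLineSt p).2.2.1 (pvLineSt p).2.2.2 0 0]
      have h2 : ((0 : Int), ([] : List Char), (0 : Int), (0 : Int)) = pvLineSt [] := rfl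
      rw [h2, ih, pvLine_contrib]
      simp only [pvLines, hb, if_true, pvCsum_cons, pvAdd3_assoc]
    · have h1 : pvScan ((c :: r) ++ ['\n']) C (pvLineSt p)
          = pvScan (r ++ ['\n']) C (pvLStep (pvLineSt p) c) := by
        simp [pvScan, hb]
      have h2 : pvLStep (pvLineSt p) c = pvLineSt (p ++ [c]) := by
        simp [pvLineSt, List.foldl_append]
      rw [h1, h2, ih]
      simp [pvLines, hb]

----------------------------------------------------------------
-- the index loop is the abstract scanner
----------------------------------------------------------------

def pvOut (s : PvSt) : Int × Int × Int := (s.files, s.ins, s.dels)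

-- with two tabs already seen, the running field text is never read again
theorem pvScan_accIrrel (l : List Char) :
    ∀ (C : Int × Int × Int) (field : Int) (acc acc' : List Char) (add dele : Int),
      2 ≤ field → pvScan l C (field, acc, add, dele) = pvScan l C (field, acc', add, dele) := by
  induction l with
  | nil => intro _ _ _ _ _ _ _; rfl
  | cons c r ih =>
    intro C field acc acc' add dele hf
    by_cases hb : pvBrk c = true
    · simp only [pvScan, hb, if_true, pvFlush, hf, if_pos]
    · simp only [pvScan, hb, if_false, pvLStep, hf, if_pos]
      exact ih C field acc acc' add dele hf

theorem pvScan_cons_brk (c : Char) (l : List Char) (C : Int × Int × Int)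
    (st : Int × List Char × Int × Int) (h : pvBrk c = true) :
    pvScan (c :: l) C st = pvScan l (pvAdd3 C (pvFlush st)) (0, [], st.2.2.1, st.2.2.2) := by
  simp [pvScan, h]

theorem pvScan_cons_nobrk (c : Char) (l : List Char) (C : Int × Int × Int)
    (st : Int × List Char × Int × Int) (h : pvBrk c = false) :
    pvScan (c :: l) C st = pvScan l C (pvLStep st c) := by
  simp [pvScan, h]

theorem pvIdx_scan (cs : List Char) :
    ∀ (m k : Nat), k + m = cs.length → ∀ (F I D add dele : Int) (field : Int) (start : Nat),
      start ≤ k →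
      pvOut ((PySem.List.pyRange (k : Int) ((cs.length : Int) + 1) 1).foldl (pvStepB cs)
          ⟨F, I, D, field, (start : Int), add, dele⟩)
        = pvScan ((cs.drop k) ++ ['\n']) (F, I, D)
            (field, (cs.drop start).take (k - start), add, dele) := by
  intro m
  induction m with
  | zero =>
    intro k hk F I D add dele field start hs
    have hk' : k = cs.length := by omega
    subst hk'
    rw [PySem.List.pyRange_one_cons (by omega)]
    rw [show PySem.List.pyRange ((cs.length : Int) + 1) ((cs.length : Int) + 1) 1 = [] from by
      simp [pysem]]
    simp only [List.foldl_cons, List.foldl_nil, List.drop_length, List.nil_append]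
    rw [show pvStepB cs ⟨F, I, D, field, (start : Int), add, dele⟩ (cs.length : Int)
        = (let s : PvSt := if 2 ≤ field then
              ⟨F + 1, I + add, D + dele, field, (start : Int), add, dele⟩
            else ⟨F, I, D, field, (start : Int), add, dele⟩
           { s with field := 0, start := (cs.length : Int) + 1 }) from by
      simp [pvStepB]]
    by_cases hf : 2 ≤ field
    · simp [hf, pvOut, pvScan, pvBrk, pvFlush, pvAdd3_def]
    · simp [hf, pvOut, pvScan, pvBrk, pvFlush, pvAdd3_def]
  | succ m ihm =>
    intro k hk F I D add dele field start hs
    have hklt : k < cs.length := by omega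
    rw [PySem.List.pyRange_one_cons (by omega)]
    simp only [List.foldl_cons]
    have hget : (if (k : Int) < (cs.length : Int) then
          (PySem.List.pyGet? cs (k : Int)).getD '\n' else '\n') = cs[k] := by
      rw [if_pos (by exact_mod_cast hklt)]
      rw [PySem.List.pyGet?_natCast]
      simp [List.getElem?_eq_getElem hklt]
    have hdrop : cs.drop k = cs[k] :: cs.drop (k + 1) := List.drop_eq_getElem_cons hklt
    have hcast : ((k + 1 : Nat) : Int) = (k : Int) + 1 := by push_cast; ring
    by_cases hb : cs[k] = '\n' ∨ cs[k] = '\r'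
    · -- line break: flush
      have hstep : pvStepB cs ⟨F, I, D, field, (start : Int), add, dele⟩ (k : Int)
          = (if 2 ≤ field then
              ⟨F + 1, I + add, D + dele, 0, (k : Int) + 1, add, dele⟩
            else ⟨F, I, D, 0, (k : Int) + 1, add, dele⟩) := by
        simp only [pvStepB]
        rw [hget, if_pos hb]
        by_cases hf : 2 ≤ field <;> simp [hf]
      have hbrk : pvBrk cs[k] = true := by
        rcases hb with hb | hb <;> simp [pvBrk, hb]
      by_cases hf : 2 ≤ field
      · have H := ihm (k + 1) (by omega) (F + 1) (I + add) (D + dele) add dele 0 (k + 1)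
          (le_refl _)
        rw [hcast] at H
        rw [hstep, if_pos hf, H, hdrop, List.cons_append, pvScan_cons_brk _ _ _ _ hbrk]
        simp [pvFlush, hf, pvAdd3_def]
      · have H := ihm (k + 1) (by omega) F I D add dele 0 (k + 1) (le_refl _)
        rw [hcast] at H
        rw [hstep, if_neg hf, H, hdrop, List.cons_append, pvScan_cons_brk _ _ _ _ hbrk]
        simp [pvFlush, hf, pvAdd3_def]
    · have hbrk : pvBrk cs[k] = false := by
        simp [pvBrk]
        exact ⟨fun h => hb (Or.inl h), fun h => hb (Or.inr h)⟩
      by_cases hf : 2 ≤ field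
      · -- inside the path: nothing happens
        have hstep : pvStepB cs ⟨F, I, D, field, (start : Int), add, dele⟩ (k : Int)
            = ⟨F, I, D, field, (start : Int), add, dele⟩ := by
          simp only [pvStepB]
          rw [hget, if_neg hb, if_pos hf]
        have H := ihm (k + 1) (by omega) F I D add dele field start (by omega)
        rw [hcast] at H
        rw [hstep, H, hdrop, List.cons_append, pvScan_cons_nobrk _ _ _ _ hbrk]
        rw [show pvLStep (field, (cs.drop start).take (k - start), add, dele) cs[k]
            = (field, (cs.drop start).take (k - start), add, dele) from by
          simp [pvLStep, hf]]
        exact (pvScan_accIrrel _ _ _ _ _ _ _ hf).symm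
      · by_cases ht : cs[k] = '\t'
        · -- field separator: commit the field value
          have hslice : PySem.List.slice cs (some (start : Int)) (some (k : Int))
              = (cs.drop start).take (k - start) := PySem.List.slice_natCast cs start k
          have hstep : pvStepB cs ⟨F, I, D, field, (start : Int), add, dele⟩ (k : Int)
              = ⟨F, I, D, field + 1, (k : Int) + 1,
                  (if field = 0 then pvVal ((cs.drop start).take (k - start)) else add),
                  (if field = 0 then dele else pvVal ((cs.drop start).take (k - start)))⟩ := by
            simp only [pvStepB]
            rw [hget, if_neg hb, if_neg hf, if_pos ht, hslice]
            by_cases h0 : field = 0 <;> simp [h0]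
          have H := ihm (k + 1) (by omega) F I D
            (if field = 0 then pvVal ((cs.drop start).take (k - start)) else add)
            (if field = 0 then dele else pvVal ((cs.drop start).take (k - start)))
            (field + 1) (k + 1) (le_refl _)
          rw [hcast] at H
          rw [hstep, H, hdrop, List.cons_append, pvScan_cons_nobrk _ _ _ _ hbrk]
          rw [show pvLStep (field, (cs.drop start).take (k - start), add, dele) cs[k]
              = (field + 1, [],
                  (if field = 0 then pvVal ((cs.drop start).take (k - start)) else add),
                  (if field = 0 then dele else pvVal ((cs.drop start).take (k - start)))) from by
            simp [pvLStep, hf, ht]]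
          simp
        · -- ordinary character: the current field grows by one
          have hstep : pvStepB cs ⟨F, I, D, field, (start : Int), add, dele⟩ (k : Int)
              = ⟨F, I, D, field, (start : Int), add, dele⟩ := by
            simp only [pvStepB]
            rw [hget, if_neg hb, if_neg hf, if_neg ht]
          have htake : (cs.drop start).take (k + 1 - start)
              = (cs.drop start).take (k - start) ++ [cs[k]] := by
            rw [show k + 1 - start = (k - start) + 1 from by omega, List.take_succ]
            congr 1
            rw [List.getElem?_drop]
            rw [show start + (k - start) = k from by omega]
            simp [List.getElem?_eq_getElem hklt]
          have H := ihm (k + 1) (by omega) F I D add dele field start (by omega)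
          rw [hcast] at H
          rw [hstep, H, htake, hdrop, List.cons_append, pvScan_cons_nobrk _ _ _ _ hbrk]
          rw [show pvLStep (field, (cs.drop start).take (k - start), add, dele) cs[k]
              = (field, (cs.drop start).take (k - start) ++ [cs[k]], add, dele) from by
            simp [pvLStep, hf, ht]]

----------------------------------------------------------------
-- A's loop in closed form
----------------------------------------------------------------

-- the contribution of one line at the String level (exactly A's per-line action)
def pvContribS (line : String) : Int × Int × Int :=
  match PySem.Str.splitMax? line "\t" 2 with
  | some [a, d, _] =>
      (1, if PySem.Str.strIsdigit a then (PySem.Int.ofStr? a).getD 0 else 0,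
          if PySem.Str.strIsdigit d then (PySem.Int.ofStr? d).getD 0 else 0)
  | _ => (0, 0, 0)

def pvCsumS (ls : List String) : Int × Int × Int :=
  ((ls.map (fun l => (pvContribS l).1)).sum,
   (ls.map (fun l => (pvContribS l).2.1)).sum,
   (ls.map (fun l => (pvContribS l).2.2)).sum)

-- the three in-place modifies on the 3-key summary dict, in closed form
theorem pvModify3 (x y z I D : Int) :
    ((((PySem.Dict.mk [("files_changed", x), ("insertions", y), ("deletions", z)]).modify
        "files_changed" 0 (· + 1)).modify "insertions" 0 (· + I)).modify "deletions" 0 (· + D))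
    = PySem.Dict.mk [("files_changed", x + 1), ("insertions", y + I), ("deletions", z + D)] := by
  apply PySem.Dict.ext
  simp [PySem.Dict.modify, PySem.Dict.getD, PySem.Dict.get?, PySem.Dict.insert,
    PySem.Dict.contains]

theorem pvCsumS_cons (l : String) (ls : List String) :
    pvCsumS (l :: ls) = pvAdd3 (pvContribS l) (pvCsumS ls) := by
  simp [pvCsumS, pvAdd3]

-- loop invariant: A's fold over the remaining lines adds the per-line contributions
theorem pvLoopA (ls : List String) :
    ∀ (x y z : Int),
      ((ls.foldl pvStepA
          (PySem.Dict.mk [("files_changed", x), ("insertions", y), ("deletions", z)]))).items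
      = [("files_changed", x + (pvCsumS ls).1), ("insertions", y + (pvCsumS ls).2.1),
         ("deletions", z + (pvCsumS ls).2.2)] := by
  induction ls with
  | nil => intro x y z; simp [pvCsumS, PySem.Dict.items]
  | cons l ls ih =>
    intro x y z
    rw [List.foldl_cons, pvCsumS_cons]
    rcases h : PySem.Str.splitMax? l "\t" 2 with _ | ps
    · have hstep : pvStepA (PySem.Dict.mk [("files_changed", x), ("insertions", y), ("deletions", z)]) l
          = PySem.Dict.mk [("files_changed", x), ("insertions", y), ("deletions", z)] := by
        simp [pvStepA, h]
      have hc : pvContribS l = (0, 0, 0) := by simp [pvContribS, h]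
      rw [hstep, ih, hc]
      simp [pvAdd3_def]
    · match ps with
      | [a, d, p] =>
        have hstep : pvStepA (PySem.Dict.mk [("files_changed", x), ("insertions", y), ("deletions", z)]) l
            = PySem.Dict.mk [("files_changed", x + 1),
                ("insertions", y + (if PySem.Str.strIsdigit a then (PySem.Int.ofStr? a).getD 0 else 0)),
                ("deletions", z + (if PySem.Str.strIsdigit d then (PySem.Int.ofStr? d).getD 0 else 0))] := by
          rw [pvStepA, h]
          exact pvModify3 x y z _ _
        have hc : pvContribS l
            = (1, if PySem.Str.strIsdigit a then (PySem.Int.ofStr? a).getD 0 else 0,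
                if PySem.Str.strIsdigit d then (PySem.Int.ofStr? d).getD 0 else 0) := by
          simp [pvContribS, h]
        rw [hstep, ih, hc]
        simp [pvAdd3_def]
        refine ⟨by ring, by ring, by ring⟩
      | [] =>
        have hstep : pvStepA (PySem.Dict.mk [("files_changed", x), ("insertions", y), ("deletions", z)]) l
            = PySem.Dict.mk [("files_changed", x), ("insertions", y), ("deletions", z)] := by
          simp [pvStepA, h]
        have hc : pvContribS l = (0, 0, 0) := by simp [pvContribS, h]
        rw [hstep, ih, hc]
        simp [pvAdd3_def]
      | [a] =>
        have hstep : pvStepA (PySem.Dict.mk [("files_changed", x), ("insertions", y), ("deletions", z)]) l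
            = PySem.Dict.mk [("files_changed", x), ("insertions", y), ("deletions", z)] := by
          simp [pvStepA, h]
        have hc : pvContribS l = (0, 0, 0) := by simp [pvContribS, h]
        rw [hstep, ih, hc]
        simp [pvAdd3_def]
      | [a, b] =>
        have hstep : pvStepA (PySem.Dict.mk [("files_changed", x), ("insertions", y), ("deletions", z)]) l
            = PySem.Dict.mk [("files_changed", x), ("insertions", y), ("deletions", z)] := by
          simp [pvStepA, h]
        have hc : pvContribS l = (0, 0, 0) := by simp [pvContribS, h]
        rw [hstep, ih, hc]
        simp [pvAdd3_def]
      | a :: b :: c :: e :: rest =>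
        have hstep : pvStepA (PySem.Dict.mk [("files_changed", x), ("insertions", y), ("deletions", z)]) l
            = PySem.Dict.mk [("files_changed", x), ("insertions", y), ("deletions", z)] := by
          simp [pvStepA, h]
        have hc : pvContribS l = (0, 0, 0) := by simp [pvContribS, h]
        rw [hstep, ih, hc]
        simp [pvAdd3_def]

-- contribS is contrib on the character lists
theorem pvContribS_eq (line : String) : pvContribS line = pvContrib line.toList := by
  have h := PySem.Str.splitMax?_map line "\t" 2
  rw [show ("\t" : String).toList = ['\t'] from rfl] at h
  rcases hs : PySem.Str.splitMax? line "\t" 2 with _ | ps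
  · rw [hs] at h
    simp at h
    rw [pvContribS, pvContrib, hs, ← h]
  · rw [hs] at h
    simp at h
    rw [pvContribS, pvContrib, hs, ← h]
    match ps with
    | [] => rfl
    | [a] => rfl
    | [a, b] => rfl
    | [a, d, p] =>
      simp [pvVal, PySem.Str.strIsdigit, PySem.Int.ofStr?]
    | a :: b :: c :: e :: rest => rfl

-- empty lines contribute nothing
theorem pvContrib_nil : pvContrib [] = (0, 0, 0) := rfl

theorem pvCsum_nil : pvCsum [] = (0, 0, 0) := rfl

theorem pvCsum_reverse (ls : List (List Char)) : pvCsum ls.reverse = pvCsum ls := by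
  simp [pvCsum]

-- equations of splitlines.go
theorem pvGoLinesNil (isB : Char → Bool) (cur : List Char) (acc : List (List Char)) :
    PySem.Chars.splitlines.go isB [] cur acc
      = if cur.isEmpty then acc.reverse else (cur.reverse :: acc).reverse := by
  simp [PySem.Chars.splitlines.go]

theorem pvGoLinesCRLF (isB : Char → Bool) (rest cur : List Char) (acc : List (List Char)) :
    PySem.Chars.splitlines.go isB ('\r' :: '\n' :: rest) cur acc
      = PySem.Chars.splitlines.go isB rest [] (cur.reverse :: acc) := by
  simp [PySem.Chars.splitlines.go]

theorem pvGoLinesCons (isB : Char → Bool) (c : Char) (rest cur : List Char)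
    (acc : List (List Char)) (h : ¬(c = '\r' ∧ ∃ t, rest = '\n' :: t)) :
    PySem.Chars.splitlines.go isB (c :: rest) cur acc
      = if isB c then PySem.Chars.splitlines.go isB rest [] (cur.reverse :: acc)
        else PySem.Chars.splitlines.go isB rest (c :: cur) acc := by
  cases rest with
  | nil => simp [PySem.Chars.splitlines.go]
  | cons d tl =>
    rw [PySem.Chars.splitlines.go.eq_def]
    split
    · next heq => cases heq
    · next heq =>
      exfalso
      injection heq with h1 h2
      injection h2 with h3 _
      exact h ⟨h1, tl, by rw [h3]⟩
    · next c' rest' hne heq =>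
      injection heq with h1 h2
      subst h1; subst h2
      rfl

-- a line-contribution sum is unchanged by how splitlines groups its accumulator
theorem pvCsum_go (isB : Char → Bool) :
    ∀ (n : Nat) (cs : List Char), cs.length ≤ n →
      ∀ (cur : List Char) (acc : List (List Char)), (∀ c ∈ cs, isB c = pvBrk c) →
        pvCsum (PySem.Chars.splitlines.go isB cs cur acc)
          = pvAdd3 (pvCsum acc) (pvCsum (pvLines cs cur.reverse)) := by
  intro n
  induction n with
  | zero =>
    intro cs hlen cur acc _
    have hcs : cs = [] := by cases cs with | nil => rfl | cons a b => simp at hlen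
    subst hcs
    rw [pvGoLinesNil]
    cases cur with
    | nil => simp [pvLines, pvCsum_reverse, pvCsum_cons, pvContrib_nil, pvAdd3_def, pvCsum_nil]
    | cons x xs =>
      rw [if_neg (by simp)]
      rw [pvCsum_reverse, pvCsum_cons]
      simp [pvLines, pvCsum_cons, pvCsum_nil, pvAdd3_def]
      omega
  | succ n ihn =>
    intro cs hlen cur acc hdom
    cases cs with
    | nil =>
      rw [pvGoLinesNil]
      cases cur with
      | nil => simp [pvLines, pvCsum_reverse, pvCsum_cons, pvContrib_nil, pvAdd3_def, pvCsum_nil]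
      | cons x xs =>
        rw [if_neg (by simp)]
        rw [pvCsum_reverse, pvCsum_cons]
        simp [pvLines, pvCsum_cons, pvCsum_nil, pvAdd3_def]
        omega
    | cons c rest =>
      by_cases hcr : c = '\r' ∧ ∃ t, rest = '\n' :: t
      · obtain ⟨hc, t, ht⟩ := hcr
        subst hc; subst ht
        rw [pvGoLinesCRLF]
        rw [ihn t (by simp at hlen; omega) [] (cur.reverse :: acc)
          (fun x hx => hdom x (by simp [hx]))]
        have h1 : pvLines ('\r' :: '\n' :: t) cur.reverse
            = cur.reverse :: [] :: pvLines t [] := by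
          simp [pvLines, pvBrk]
        rw [h1]
        simp [pvCsum_cons, pvContrib_nil, pvAdd3_def]
        omega
      · rw [pvGoLinesCons isB c rest cur acc hcr]
        rw [hdom c List.mem_cons_self]
        by_cases hb : pvBrk c = true
        · rw [hb, if_pos rfl]
          rw [ihn rest (by simp at hlen; omega) [] (cur.reverse :: acc)
            (fun x hx => hdom x (List.mem_cons_of_mem _ hx))]
          have h1 : pvLines (c :: rest) cur.reverse = cur.reverse :: pvLines rest [] := by
            simp [pvLines, hb]
          rw [h1]
          simp [pvCsum_cons, pvAdd3_def]
          omega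
        · rw [Bool.not_eq_true] at hb
          rw [hb, if_neg (by simp)]
          rw [ihn rest (by simp at hlen; omega) (c :: cur) acc
            (fun x hx => hdom x (List.mem_cons_of_mem _ hx))]
          have h1 : pvLines (c :: rest) cur.reverse = pvLines rest (cur.reverse ++ [c]) := by
            simp [pvLines, hb]
          rw [h1]
          simp

-- the two lambda forms of the break test agree on Dom characters
theorem pvIsB_eq (c : Char) (h : pvDomChar c = true) :
    ((decide (c.toNat = 10) || decide (c.toNat = 13) || decide (c.toNat = 11) ||
      decide (c.toNat = 12) || decide (c.toNat = 28) || decide (c.toNat = 29) ||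
      decide (c.toNat = 30) || decide (c.toNat = 133) || decide (c.toNat = 8232) ||
      decide (c.toNat = 8233)) : Bool) = pvBrk c := by
  by_cases h10 : c.toNat = 10
  · have : c = '\n' := by
      have h2 := Char.ofNat_toNat c
      rw [h10] at h2
      exact h2.symm
    subst this
    decide
  · by_cases h13 : c.toNat = 13
    · have : c = '\r' := by
        have h2 := Char.ofNat_toNat c
        rw [h13] at h2
        exact h2.symm
      subst this
      decide
    · have hdom : (32 ≤ c.toNat ∧ c.toNat ≤ 126) ∨ c.toNat = 9 ∨ c.toNat = 10 ∨ c.toNat = 13 := by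
        simp [pvDomChar] at h
        tauto
      have hn : c ≠ '\n' := fun hh => h10 (by rw [hh]; rfl)
      have hr : c ≠ '\r' := fun hh => h13 (by rw [hh]; rfl)
      rw [show pvBrk c = false from by simp [pvBrk, hn, hr]]
      simp only [Bool.or_eq_false_iff, decide_eq_false_iff_not]
      omega

-- the String-level sums are the Chars-level sums
theorem pvCsumS_map (L : List (List Char)) :
    pvCsumS (L.map String.ofList) = pvCsum L := by
  induction L with
  | nil => rfl
  | cons l ls ih =>
    rw [List.map_cons, pvCsumS_cons, pvContribS_eq, String.toList_ofList, ih, pvCsum_cons]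

-- ===== VERDICT (by name: the statement is the Claim_ definition above) =====
theorem parse_numstat_output_spec : Claim_equal_parse_numstat_output := by
  intro text hdom
  unfold Spec_parse_numstat_output parse_numstat_output parse_numstat_output_alt
  rw [pvLoopA (PySem.Str.splitlines text) 0 0 0]
  -- B's scanner result
  have hB := pvIdx_scan text.toList text.toList.length 0 (by omega) 0 0 0 0 0 0 0 (by omega)
  rw [show ((0 : Nat) : Int) = (0 : Int) from rfl] at hB
  simp only [List.drop_zero, Nat.sub_zero, List.take_zero] at hB
  have hB2 : pvScan (text.toList ++ ['\n']) (0, 0, 0) ((0 : Int), ([] : List Char), (0 : Int), (0 : Int))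
      = pvAdd3 (0, 0, 0) (pvCsum (pvLines text.toList [])) := by
    have := pvScan_lines text.toList (0, 0, 0) []
    rw [show pvLineSt [] = ((0 : Int), ([] : List Char), (0 : Int), (0 : Int)) from rfl] at this
    exact this
  rw [hB2] at hB
  -- A's sums equal B's sums
  have hA : pvCsumS (PySem.Str.splitlines text) = pvCsum (pvLines text.toList []) := by
    rw [show PySem.Str.splitlines text
        = (PySem.Chars.splitlines text.toList).map String.ofList from rfl]
    rw [pvCsumS_map]
    rw [show PySem.Chars.splitlines text.toList
        = PySem.Chars.splitlines.go
            (fun c =>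
              have n := c.toNat
              decide (n = 10) || decide (n = 13) || decide (n = 11) || decide (n = 12) ||
                decide (n = 28) || decide (n = 29) || decide (n = 30) || decide (n = 133) ||
                decide (n = 8232) || decide (n = 8233)) text.toList [] [] from rfl]
    rw [pvCsum_go _ text.toList.length text.toList (le_refl _) [] []
      (fun c hc => pvIsB_eq c (by
        have := hdom
        unfold Dom_parse_numstat_output pvDomStr at this
        exact List.all_eq_true.1 this c hc))]
    simp [pvCsum_nil, pvAdd3_def, List.reverse_nil]
  rw [hA]
  -- assemble the item lists
  have h1 := congrArg Prod.fst hB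
  have h2 := congrArg (fun p => p.2.1) hB
  have h3 := congrArg (fun p => p.2.2) hB
  simp only [pvOut, pvAdd3_def] at h1 h2 h3
  simp at h1 h2 h3 ⊢
  exact ⟨h1.symm, h2.symm, h3.symm⟩
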